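-- pv_equiv track=rewrite | github.com/TomerEven/Pocket_Dictionary | Python_Code/Endec/Lookup_Table.py | get_n_words_of_sub
-- ===== SOURCE A (Python) =====
-- def add_leading_zeros(s: str, length: int) -> str:
--     assert len(s) <= length
--     return "0"*(length - len(s)) + s
--
-- def surround_by_sub(s: str, sub: str) -> str:
--     return sub + s + sub
--
-- def get_n_words_of_sub(sub: str, n: int) -> list:
--     fl = [sub + sub]
--     temp_length = 1
--     while len(fl) < n:
--         temp_list = [add_leading_zeros(bin(i)[2:], temp_length) for i in range(1 << temp_length)]
--         temp_list = [surround_by_sub(s, sub) for s in temp_list if s.count(sub) == 0]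
--         fl += temp_list
--         temp_length += 1
--     return fl[:n]
--
-- fl = []
--
-- s = "01010"
-- ===== SOURCE B (Python) =====
-- def _gen(sub, prefix, k, out):
--     # prune: prefix's earlier part is known clean, so an occurrence of sub can only be a suffix
--     if sub and prefix.endswith(sub):
--         return
--     if k == 0:
--         out.append(sub + prefix + sub)
--         return
--     _gen(sub, prefix + "0", k - 1, out)
--     _gen(sub, prefix + "1", k - 1, out)
--
-- def get_n_words_of_sub(sub, n):
--     words = [sub + sub]
--     length = 1
--     while len(words) < n:
--         _gen(sub, "", length, words)
--         length += 1
--     return words[:n]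
-- ===== Notes on version B (the rewrite author's own statement) =====
-- stated objective: alternative
-- what changed: A enumerates all 2^L binary strings of each length L (via bin(i) + zero padding) and filters out those containing sub; B generates the surviving words directly by a recursive DFS that extends a prefix one bit at a time and prunes as soon as the prefix ends with sub, never visiting pruned subtrees (a big win when sub is itself a binary string, same cost otherwise).
import Mathlib
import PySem

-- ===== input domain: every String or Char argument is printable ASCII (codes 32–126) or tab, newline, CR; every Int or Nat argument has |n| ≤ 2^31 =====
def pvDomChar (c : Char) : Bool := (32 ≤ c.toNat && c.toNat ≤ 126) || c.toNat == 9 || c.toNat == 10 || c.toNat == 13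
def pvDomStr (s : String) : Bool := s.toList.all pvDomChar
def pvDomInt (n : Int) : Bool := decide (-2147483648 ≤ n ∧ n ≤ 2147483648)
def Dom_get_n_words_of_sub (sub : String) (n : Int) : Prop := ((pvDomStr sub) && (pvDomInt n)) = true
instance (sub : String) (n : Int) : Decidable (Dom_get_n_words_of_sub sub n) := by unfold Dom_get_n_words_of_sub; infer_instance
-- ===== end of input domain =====

-- B replaces A's per-length enumerate-all-2^L-strings-and-filter by a DFS that only extends
-- sub-free prefixes (pruning as soon as the prefix ends with sub); same return value on Pre_.

-- ===== PORT A =====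

-- "0"*(length - len(s)) + s.  Python's negative string repeat gives "", matching truncated Nat
-- subtraction.  The assert is not modelled: at A's only call sites len(bin(i)[2:]) ≤ temp_length.
def add_leading_zeros (s : List Char) (length : Nat) : List Char :=
  List.replicate (length - s.length) '0' ++ s

def surround_by_sub (s : List Char) (sub : List Char) : List Char :=
  sub ++ s ++ sub

-- the 'while len(fl) < n' loop, totalized with fuel = n.toNat iterations: for sub ≠ "" every pass
-- appends at least one word (the all-'0' or the all-'1' word of that length survives the filter),
-- so at most max(n-1,0) passes ever run and the fuel is never exhausted on Pre_.
-- bin(i)[2:] for i ≥ 0 is PySem.Int.toBinChars i; range(1 << temp_length) is pyRange 0 (1 <<< L) 1.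
def aLoop (sub : List Char) (n : Int) (fl : List (List Char)) (L : Nat) (fuel : Nat) :
    List (List Char) :=
  match fuel with
  | 0 => fl
  | fuel+1 =>
    if (fl.length : Int) < n then
      let temp_list := (PySem.List.pyRange 0 ((1:Int) <<< L) 1).map
          (fun i => add_leading_zeros (PySem.Int.toBinChars i) L)
      let temp_list2 := (temp_list.filter (fun s => PySem.Chars.count s sub == 0)).map
          (fun s => surround_by_sub s sub)
      aLoop sub n (fl ++ temp_list2) (L+1) fuel
    else fl

-- fl[:n] is PySem.List.slice fl none (some n)
def get_n_words_of_sub (sub : String) (n : Int) : List String :=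
  (PySem.List.slice (aLoop sub.toList n [sub.toList ++ sub.toList] 1 n.toNat) none (some n)).map
    String.ofList

-- ===== PORT B =====

-- DFS of B's _gen: extend a sub-free prefix by '0' then '1'; prune when the prefix ends with sub
-- ('if sub and prefix.endswith(sub)').  k = number of characters still to append.
def pvGen (sub : List Char) (pre : List Char) (k : Nat) : List (List Char) :=
  if !sub.isEmpty && PySem.Chars.endswith pre sub then []
  else
    match k with
    | 0 => [sub ++ pre ++ sub]
    | k+1 => pvGen sub (pre ++ ['0']) k ++ pvGen sub (pre ++ ['1']) k

-- B's while loop, same shape and fuel policy as A's (see the comment on aLoop)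
def bLoop (sub : List Char) (n : Int) (words : List (List Char)) (L : Nat) (fuel : Nat) :
    List (List Char) :=
  match fuel with
  | 0 => words
  | fuel+1 =>
    if (words.length : Int) < n then bLoop sub n (words ++ pvGen sub [] L) (L+1) fuel
    else words

def get_n_words_of_sub_alt (sub : String) (n : Int) : List String :=
  (PySem.List.slice (bLoop sub.toList n [sub.toList ++ sub.toList] 1 n.toNat) none (some n)).map
    String.ofList

-- ===== PRECONDITION & SPEC =====
-- Pre_ excludes only sub = "" with n > 1, where A's while loop never adds a word
-- (s.count("") > 0 for every s) and A diverges; A returns on every input Pre_ admits.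
def Pre_get_n_words_of_sub (sub : String) (n : Int) : Prop := sub ≠ "" ∨ n ≤ 1
instance (sub : String) (n : Int) : Decidable (Pre_get_n_words_of_sub sub n) := by
  unfold Pre_get_n_words_of_sub; infer_instance

def pvWitness_get_n_words_of_sub : String × Int := ("010", 5)

def Spec_get_n_words_of_sub (sub : String) (n : Int) (out : List String) : Prop :=
  out = get_n_words_of_sub_alt sub n
instance (sub : String) (n : Int) (out : List String) :
    Decidable (Spec_get_n_words_of_sub sub n out) := by
  unfold Spec_get_n_words_of_sub; infer_instance

-- ===== CLAIM (what is proved, stated in full; the proofs are below) =====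
def Claim_equal_get_n_words_of_sub : Prop :=
  ∀ (sub : String) (n : Int), Dom_get_n_words_of_sub sub n →
    Pre_get_n_words_of_sub sub n →
      Spec_get_n_words_of_sub sub n (get_n_words_of_sub sub n)

-- ===== LEMMAS AND PROOFS =====

-- i written in exactly L binary digits, most significant first
def toL : Nat → Nat → List Char
  | 0, _ => []
  | L+1, i => toL L (i / 2) ++ [if i % 2 = 1 then '1' else '0']

-- binary digits of n, no leading zeros ([] for 0)
def myBits : Nat → List Char
  | 0 => []
  | n+1 => myBits ((n+1) / 2) ++ [if (n+1) % 2 = 1 then '1' else '0']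
decreasing_by exact Nat.div_lt_self (Nat.succ_pos n) (by omega)

lemma myBits_pos (n : Nat) (h : n ≠ 0) :
    myBits n = myBits (n / 2) ++ [if n % 2 = 1 then '1' else '0'] := by
  cases n with
  | zero => omega
  | succ m => rw [myBits]

lemma digitChar_mod2 (n : Nat) : Nat.digitChar (n % 2) = if n % 2 = 1 then '1' else '0' := by
  rcases Nat.mod_two_eq_zero_or_one n with h | h <;> simp [h] <;> decide

lemma toDigitsCore_eq : ∀ (f n : Nat) (acc : List Char), n < 2 ^ f →
    Nat.toDigitsCore 2 (f+1) n acc = (if n = 0 then ['0'] else myBits n) ++ acc := by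
  intro f
  induction f with
  | zero =>
    intro n acc h
    interval_cases n
    simp [Nat.toDigitsCore]
    decide
  | succ f ih =>
    intro n acc h
    rw [Nat.toDigitsCore]
    by_cases h2 : n / 2 = 0
    · simp only [h2, if_pos]
      have : n = 0 ∨ n = 1 := by omega
      rcases this with h0 | h1
      · simp [h0]; decide
      · rw [h1, myBits_pos 1 (by omega)]
        simp [myBits]; decide
    · simp only [h2]
      rw [ih (n / 2) _ (by omega)]
      simp only [h2, if_false]
      rw [myBits_pos n (by omega), digitChar_mod2]
      rw [if_neg (by omega : ¬ n = 0)]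
      simp

lemma toBinChars_nat (i : Nat) :
    PySem.Int.toBinChars (i : Int) = if i = 0 then ['0'] else myBits i := by
  have h1 : ¬ ((i : Int) < 0) := by omega
  rw [PySem.Int.toBinChars, if_neg h1]
  rw [Nat.toDigits]
  simp only [Int.toNat_natCast]
  exact toDigitsCore_eq i i [] (Nat.lt_two_pow_self) |>.trans (by simp)

lemma toL_zero (L : Nat) : toL L 0 = List.replicate L '0' := by
  induction L with
  | zero => rfl
  | succ L ih => rw [toL]; simp [ih, List.replicate_succ']

lemma pad_myBits : ∀ (L i : Nat), i < 2 ^ L →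
    List.replicate (L - (myBits i).length) '0' ++ myBits i = toL L i := by
  intro L
  induction L with
  | zero =>
    intro i h
    interval_cases i
    simp [myBits, toL]
  | succ L ih =>
    intro i h
    by_cases h0 : i = 0
    · subst h0; simp [myBits, toL_zero]
    · rw [myBits_pos i h0, toL]
      have hi2 : i / 2 < 2 ^ L := by
        have := Nat.pow_succ 2 L ▸ h; omega
      rw [← ih (i / 2) hi2]
      simp only [List.length_append, List.length_singleton]
      rw [← List.append_assoc]
      congr 2
      congr 1
      omega

lemma pad_toBinChars (L i : Nat) (hL : 1 ≤ L) (h : i < 2 ^ L) :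
    add_leading_zeros (PySem.Int.toBinChars (i : Int)) L = toL L i := by
  rw [add_leading_zeros, toBinChars_nat]
  by_cases h0 : i = 0
  · subst h0
    rw [show (if (0:Nat) = 0 then ['0'] else myBits 0) = ['0'] from rfl, toL_zero]
    rw [show List.replicate L '0' = List.replicate (L-1) '0' ++ ['0'] by
      rw [← List.replicate_succ']; congr 1; omega]
    congr 2
  · rw [if_neg h0]; exact pad_myBits L i h

lemma toL_succ (L i : Nat) (h : i < 2 ^ (L+1)) :
    toL (L+1) i = (if i < 2 ^ L then '0' else '1') :: toL L (i % 2 ^ L) := by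
  induction L generalizing i with
  | zero =>
    interval_cases i <;> decide
  | succ L ih =>
    rw [toL]
    have h2 : i / 2 < 2 ^ (L + 1) := by
      have := Nat.pow_succ 2 (L+1) ▸ h; omega
    rw [ih (i / 2) h2]
    conv_rhs => rw [toL]
    rw [List.cons_append]
    have e2 : i / 2 % 2 ^ L = i % 2 ^ (L+1) / 2 := by
      have := Nat.mod_mul_right_div_self i 2 (2 ^ L)
      rw [show 2 * 2 ^ L = 2 ^ (L+1) by ring] at this
      omega
    have e3 : i % 2 ^ (L+1) % 2 = i % 2 := Nat.mod_mod_of_dvd i ⟨2 ^ L, by ring⟩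
    rw [e2, e3]
    by_cases hc : i < 2 ^ (L+1)
    · rw [if_pos hc, if_pos (by rw [Nat.pow_succ] at hc; omega)]
    · rw [if_neg hc, if_neg (by rw [Nat.pow_succ] at hc; omega)]

-- all binary words of length L, in A's enumeration order
def allS (L : Nat) : List (List Char) := (List.range (2 ^ L)).map (toL L)

lemma allS_succ (L : Nat) :
    allS (L+1) = (allS L).map ('0' :: ·) ++ (allS L).map ('1' :: ·) := by
  unfold allS
  rw [show 2 ^ (L+1) = 2 ^ L + 2 ^ L by ring, List.range_add, List.map_append]
  congr 1
  · rw [List.map_map]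
    refine List.map_congr_left ?_
    intro i hi
    rw [List.mem_range] at hi
    show toL (L+1) i = '0' :: toL L i
    rw [toL_succ L i (by omega), if_pos hi, Nat.mod_eq_of_lt hi]
  · rw [List.map_map, List.map_map]
    refine List.map_congr_left ?_
    intro i hi
    rw [List.mem_range] at hi
    show toL (L+1) (2 ^ L + i) = '1' :: toL L i
    rw [toL_succ L (2 ^ L + i) (by omega), if_neg (by omega), Nat.add_mod_left, Nat.mod_eq_of_lt hi]

lemma count_go_le (sub : List Char) : ∀ (fuel : Nat) (l : List Char) (acc : Nat),
    acc ≤ PySem.Chars.count.go sub fuel l acc := by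
  intro fuel
  induction fuel with
  | zero => intro l acc; simp [PySem.Chars.count.go]
  | succ fuel ih =>
    intro l acc
    cases l with
    | nil => simp [PySem.Chars.count.go]
    | cons h t =>
      rw [PySem.Chars.count.go]
      split
      · exact le_trans (by omega) (ih _ _)
      · exact ih _ _

lemma count_go_not_infix (sub : List Char) : ∀ (fuel : Nat) (l : List Char) (acc : Nat),
    ¬ sub <:+: l → PySem.Chars.count.go sub fuel l acc = acc := by
  intro fuel
  induction fuel with
  | zero => intro l acc _; simp [PySem.Chars.count.go]
  | succ fuel ih =>
    intro l acc hni
    cases l with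
    | nil => simp [PySem.Chars.count.go]
    | cons h t =>
      rw [PySem.Chars.count.go]
      split
      · rename_i hp
        exact absurd ((List.isPrefixOf_iff_prefix.mp hp).isInfix) hni
      · exact ih t acc (fun hin => hni (hin.trans (List.suffix_cons h t).isInfix))

lemma count_go_infix (sub : List Char) (hsub : sub ≠ []) :
    ∀ (fuel : Nat) (l : List Char) (acc : Nat), l.length ≤ fuel → sub <:+: l →
      acc < PySem.Chars.count.go sub fuel l acc := by
  intro fuel
  induction fuel with
  | zero =>
    intro l acc hlen hin
    have : l = [] := List.length_eq_zero_iff.mp (by omega)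
    subst this
    exact absurd (List.eq_nil_of_infix_nil hin) hsub
  | succ fuel ih =>
    intro l acc hlen hin
    cases l with
    | nil => exact absurd (List.eq_nil_of_infix_nil hin) hsub
    | cons h t =>
      rw [PySem.Chars.count.go]
      split
      · calc acc < acc + 1 := by omega
          _ ≤ _ := count_go_le sub fuel _ (acc+1)
      · rename_i hp
        have hint : sub <:+: t := by
          rcases List.infix_cons_iff.mp hin with hpre | hinf
          · exact absurd (List.isPrefixOf_iff_prefix.mpr hpre) (by simpa using hp)
          · exact hinf
        exact ih t acc (by simpa using Nat.lt_succ_iff.mp (by simpa using hlen)) hint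

lemma count_eq_zero_iff (sub s : List Char) (hsub : sub ≠ []) :
    PySem.Chars.count s sub = 0 ↔ ¬ sub <:+: s := by
  rw [PySem.Chars.count, if_neg (by simpa using hsub)]
  constructor
  · intro h hin
    have := count_go_infix sub hsub s.length s 0 le_rfl hin
    omega
  · intro h
    exact count_go_not_infix sub s.length s 0 h

lemma infix_iff_suffix_of_dropLast (sub p : List Char) (hdl : ¬ sub <:+: p.dropLast) :
    sub <:+: p ↔ sub <:+ p := by
  constructor
  · rintro ⟨a, b, hab⟩
    cases b with
    | nil => exact ⟨a, by simpa using hab⟩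
    | cons c cs =>
      exfalso
      apply hdl
      rw [← hab, List.append_assoc, List.dropLast_append_of_ne_nil (by simp)]
      exact ⟨a, (c :: cs).dropLast, by simp⟩
  · exact fun h => h.isInfix

lemma infix_append_right (sub p t : List Char) (h : sub <:+: p) : sub <:+: p ++ t :=
  h.trans ((List.prefix_append p t).isInfix)

-- the DFS from a clean prefix returns exactly the surviving surrounded words, in order
lemma pvGen_spec (sub : List Char) (hsub : sub ≠ []) : ∀ (k : Nat) (p : List Char),
    ¬ sub <:+: p.dropLast →
    pvGen sub p k =
      (((allS k).map (p ++ ·)).filter (fun s => !(decide (sub <:+: s)))).map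
        (fun s => sub ++ s ++ sub) := by
  intro k
  induction k with
  | zero =>
    intro p hdl
    rw [pvGen]
    by_cases hs : sub <:+ p
    · rw [if_pos (by simp [hsub, (PySem.Chars.endswith_iff p sub).mpr hs])]
      have : sub <:+: p := hs.isInfix
      simp [allS, toL, this]
    · rw [if_neg (by
        simp only [Bool.and_eq_true, Bool.not_eq_true']
        intro ⟨_, h2⟩
        exact hs ((PySem.Chars.endswith_iff p sub).mp h2))]
      have : ¬ sub <:+: p := fun h => hs ((infix_iff_suffix_of_dropLast sub p hdl).mp h)
      simp [allS, toL, this]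
  | succ k ih =>
    intro p hdl
    rw [pvGen]
    by_cases hs : sub <:+ p
    · rw [if_pos (by simp [hsub, (PySem.Chars.endswith_iff p sub).mpr hs])]
      symm
      rw [List.map_eq_nil_iff, List.filter_eq_nil_iff]
      intro s hsmem
      rw [List.mem_map] at hsmem
      obtain ⟨t, _, rfl⟩ := hsmem
      simp [infix_append_right sub p t hs.isInfix]
    · rw [if_neg (by
        simp only [Bool.and_eq_true, Bool.not_eq_true']
        intro ⟨_, h2⟩
        exact hs ((PySem.Chars.endswith_iff p sub).mp h2))]
      have hnp : ¬ sub <:+: p := fun h => hs ((infix_iff_suffix_of_dropLast sub p hdl).mp h)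
      rw [ih (p ++ ['0']) (by simpa using hnp), ih (p ++ ['1']) (by simpa using hnp)]
      rw [allS_succ, List.map_append, List.map_map, List.map_map,
        show ((fun x => p ++ x) ∘ fun x : List Char => '0' :: x) = (fun x => (p ++ ['0']) ++ x) by
          funext x; simp,
        show ((fun x => p ++ x) ∘ fun x : List Char => '1' :: x) = (fun x => (p ++ ['1']) ++ x) by
          funext x; simp,
        List.filter_append, List.map_append]

lemma pyRange_pow (L : Nat) :
    PySem.List.pyRange 0 ((1:Int) <<< L) 1 = (List.range (2 ^ L)).map Int.ofNat := by
  rw [PySem.List.pyRange_one]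
  have h1 : ((1:Int) <<< L) = (2 ^ L : Nat) := by
    rw [Int.shiftLeft_eq]; push_cast; ring
  rw [h1]
  have h2 : ((2 ^ L : Nat) : Int) - 0 = ((2 ^ L : Nat) : Int) := by ring
  rw [h2, Int.toNat_natCast]
  apply List.map_congr_left
  intro k _
  simp [Int.ofNat_eq_natCast]

-- one pass of A's while body produces exactly pvGen sub [] L
lemma level_eq (sub : List Char) (hsub : sub ≠ []) (L : Nat) (hL : 1 ≤ L) :
    ((((PySem.List.pyRange 0 ((1:Int) <<< L) 1).map
        (fun i => add_leading_zeros (PySem.Int.toBinChars i) L)).filter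
          (fun s => PySem.Chars.count s sub == 0)).map (fun s => surround_by_sub s sub)) =
      pvGen sub [] L := by
  rw [pyRange_pow, List.map_map]
  have h1 : (List.range (2 ^ L)).map
      ((fun i => add_leading_zeros (PySem.Int.toBinChars i) L) ∘ Int.ofNat) =
      allS L := by
    apply List.map_congr_left
    intro i hi
    rw [List.mem_range] at hi
    exact pad_toBinChars L i hL hi
  rw [h1]
  rw [pvGen_spec sub hsub L []
    (fun h => hsub (List.eq_nil_of_infix_nil (by simpa using h)))]
  have h2 : ∀ s : List Char, (PySem.Chars.count s sub == 0) = !(decide (sub <:+: s)) := by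
    intro s
    by_cases hin : sub <:+: s
    · simp [hin, (not_iff_not.mpr (count_eq_zero_iff sub s hsub)).mpr (by simpa using hin)]
    · simp [hin, (count_eq_zero_iff sub s hsub).mpr hin]
  simp only [h2]
  simp [surround_by_sub]

lemma loop_eq (sub : List Char) (hsub : sub ≠ []) (n : Int) :
    ∀ (fuel : Nat) (fl : List (List Char)) (L : Nat), 1 ≤ L →
      aLoop sub n fl L fuel = bLoop sub n fl L fuel := by
  intro fuel
  induction fuel with
  | zero => intro fl L _; rfl
  | succ fuel ih =>
    intro fl L hL
    rw [aLoop, bLoop]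
    split
    · simp only [level_eq sub hsub L hL]
      exact ih _ (L+1) (by omega)
    · rfl

-- ===== VERDICT (by name: the statement is the Claim_ definition above) =====
theorem get_n_words_of_sub_spec : Claim_equal_get_n_words_of_sub := by
  intro sub n _ hpre
  unfold Spec_get_n_words_of_sub
  have hpre' : sub ≠ "" ∨ n ≤ 1 := hpre
  rw [get_n_words_of_sub, get_n_words_of_sub_alt]
  by_cases hs : sub = ""
  · have hn : n ≤ 1 := by tauto
    by_cases h0 : n ≤ 0
    · rw [Int.toNat_of_nonpos h0]
      rfl
    · have h1 : n = 1 := by omega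
      subst h1
      simp [aLoop, bLoop]
  · rw [loop_eq sub.toList (fun h => hs (String.toList_eq_nil_iff.mp h)) n _ _ 1 le_rfl]
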